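-- pv_equiv track=rewrite | github.com/boazlern/SSClustering | algorithms/remixmatch.py | interleave_offsets
-- ===== SOURCE A (Python) =====
-- def interleave_offsets(batch, nu):
--     groups = [batch // (nu + 1)] * (nu + 1)
--     for x in range(batch - sum(groups)):
--         groups[-x - 1] += 1
--     offsets = [0]
--     for g in groups:
--         offsets.append(offsets[-1] + g)
--     assert offsets[-1] == batch
--     return offsets
-- ===== SOURCE B (Python) =====
-- def interleave_offsets(batch, nu):
--     k = nu + 1
--     base, r = divmod(batch, k)
--     offsets = [i * base + max(0, i - (k - r)) for i in range(k + 1)]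
--     assert offsets[-1] == batch
--     return offsets
-- ===== Notes on version B (the rewrite author's own statement) =====
-- stated objective: simpler
-- what changed: Replaces the remainder-distribution loop over groups and the cumulative-sum loop with a single comprehension computing each offset by the closed form i*base + max(0, i-(nu+1-r)) from divmod(batch, nu+1).
-- outside the precondition, e.g. on interleave_offsets(0, -2): A returns [0], B raises IndexError
import Mathlib
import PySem

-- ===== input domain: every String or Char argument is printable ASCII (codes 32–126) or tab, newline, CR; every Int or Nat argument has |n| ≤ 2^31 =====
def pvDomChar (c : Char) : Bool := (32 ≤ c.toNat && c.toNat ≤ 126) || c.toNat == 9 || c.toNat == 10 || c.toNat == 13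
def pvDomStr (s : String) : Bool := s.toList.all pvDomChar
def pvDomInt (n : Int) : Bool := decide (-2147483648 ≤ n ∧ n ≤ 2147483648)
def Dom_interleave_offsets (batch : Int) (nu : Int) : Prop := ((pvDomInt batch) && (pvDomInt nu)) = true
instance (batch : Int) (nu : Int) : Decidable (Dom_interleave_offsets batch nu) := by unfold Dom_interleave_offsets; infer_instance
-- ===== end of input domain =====

-- B replaces A's remainder-distribution loop and cumulative-sum loop with one closed-form
-- comprehension (simpler, same cost); equivalence is proved for nu ≥ 0.

-- ===== PORT A =====
-- literal port of A; the final `assert offsets[-1] == batch` always succeeds under Pre_ (proved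
-- implicitly by the equivalence), so it adds no computation.
def interleave_offsets (batch : Int) (nu : Int) : List Int :=
  let groups := PySem.List.pyRepeat [PySem.Int.floordiv batch (nu + 1)] (nu + 1)
  let groups := (PySem.List.pyRange 0 (batch - groups.sum) 1).foldl
    (fun gs x => PySem.List.pySetD gs (-x - 1) (PySem.List.pyGetD gs (-x - 1) 0 + 1)) groups
  groups.foldl (fun offs g => offs ++ [PySem.List.pyGetD offs (-1) 0 + g]) [0]

-- ===== PORT B =====
def interleave_offsets_alt (batch : Int) (nu : Int) : List Int :=
  let k := nu + 1
  let base := PySem.Int.floordiv batch k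
  let r := PySem.Int.mod batch k
  (PySem.List.pyRange 0 (k + 1) 1).map (fun i => i * base + max 0 (i - (k - r)))

-- ===== PRECONDITION & SPEC =====
-- Pre_ excludes nu < 0: for nu = -1 A divides by zero; for nu ≤ -2 the group list is empty, so A
-- raises (IndexError or AssertionError) except at the accidental corner batch = 0, where
-- A returns [0] only because list-repetition by a negative count yields [] (B raises there too).
def Pre_interleave_offsets (batch : Int) (nu : Int) : Prop := 0 ≤ nu
instance (batch : Int) (nu : Int) : Decidable (Pre_interleave_offsets batch nu) := by unfold Pre_interleave_offsets; infer_instance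
def pvWitness_interleave_offsets : Int × Int := (10, 3)

def Spec_interleave_offsets (batch : Int) (nu : Int) (out : List Int) : Prop := out = interleave_offsets_alt batch nu
instance (batch : Int) (nu : Int) (out : List Int) : Decidable (Spec_interleave_offsets batch nu out) := by unfold Spec_interleave_offsets; infer_instance

-- ===== CLAIM (what is proved, stated in full; the proofs are below) =====
def Claim_equal_interleave_offsets : Prop := ∀ (batch : Int) (nu : Int), Dom_interleave_offsets batch nu → Pre_interleave_offsets batch nu → Spec_interleave_offsets batch nu (interleave_offsets batch nu)

-- ===== LEMMAS AND PROOFS =====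

-- prefix sums: psum s gs = the running totals A's second loop appends after s
def psum (s : Int) : List Int → List Int
  | [] => []
  | g :: gs => (s + g) :: psum (s + g) gs

theorem foldl_offsets (gs : List Int) : ∀ (acc : List Int) (s : Int),
    gs.foldl (fun offs g => offs ++ [PySem.List.pyGetD offs (-1) 0 + g]) (acc ++ [s])
      = acc ++ s :: psum s gs := by
  induction gs with
  | nil => intro acc s; simp [psum]
  | cons g gs ih =>
    intro acc s
    have h1 : PySem.List.pyGetD (acc ++ [s]) (-1) 0 = s :=
      PySem.List.pyGetD_neg_one_append_singleton acc s 0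
    simp only [List.foldl_cons, h1, psum]
    have h2 := ih (acc ++ [s]) (s + g)
    simpa [List.append_assoc] using h2

theorem psum_append (xs : List Int) : ∀ (s : Int) (ys : List Int),
    psum s (xs ++ ys) = psum s xs ++ psum (s + xs.sum) ys := by
  induction xs with
  | nil => intro s ys; simp [psum]
  | cons x xs ih =>
    intro s ys
    simp only [List.cons_append, psum, ih, List.sum_cons]
    ring_nf

theorem psum_replicate (n : Nat) : ∀ (s c : Int),
    psum s (List.replicate n c) = (List.range n).map (fun (j : Nat) => s + ((j : Int) + 1) * c) := by
  induction n with
  | zero => intro s c; simp [psum]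
  | succ n ih =>
    intro s c
    rw [List.replicate_succ]
    simp only [psum, ih (s + c), List.range_succ_eq_map, List.map_cons, List.map_map]
    congr 1
    · push_cast; ring
    · apply List.map_congr_left
      intro a _
      simp only [Function.comp, Nat.succ_eq_add_one]
      push_cast
      ring

theorem pySetD_negSucc (xs : List Int) (n : Nat) (v : Int) (h : n + 1 ≤ xs.length) :
    PySem.List.pySetD xs (-(n : Int) - 1) v = xs.set (xs.length - (n + 1)) v := by
  have h0 : ¬ (0 : Int) ≤ -(n : Int) - 1 := by omega
  have h1 : -(xs.length : Int) ≤ -(n : Int) - 1 := by omega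
  have h3 : ¬ (1 : Int) ≤ -(n : Int) := by omega
  have h4 : ((1 : Int) + (n : Int)).toNat = n + 1 := by omega
  simp [PySem.List.pySetD, PySem.List.pySet?, PySem.List.pyIdx?, h1, h3, h4]

theorem pyGetD_negSucc (xs : List Int) (n : Nat) (d : Int) (h : n + 1 ≤ xs.length) :
    PySem.List.pyGetD xs (-(n : Int) - 1) d = xs.getD (xs.length - (n + 1)) d := by
  have h0 : ¬ (0 : Int) ≤ -(n : Int) - 1 := by omega
  have h1 : -(xs.length : Int) ≤ -(n : Int) - 1 := by omega
  have h3 : ¬ (1 : Int) ≤ -(n : Int) := by omega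
  have h4 : ((1 : Int) + (n : Int)).toNat = n + 1 := by omega
  simp [PySem.List.pyGetD, PySem.List.pyGet?, PySem.List.pyIdx?, h1, h3, h4, List.getD]

theorem loop_repl (n : Nat) : ∀ (m : Nat) (base : Int),
    (PySem.List.pyRange 0 (n : Int) 1).foldl
      (fun gs x => PySem.List.pySetD gs (-x - 1) (PySem.List.pyGetD gs (-x - 1) 0 + 1))
      (List.replicate (m + n) base)
    = List.replicate m base ++ List.replicate n (base + 1) := by
  induction n with
  | zero =>
    intro m base
    rw [PySem.List.pyRange_one_eq_nil (by simp)]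
    simp
  | succ n ih =>
    intro m base
    have hc : ((n + 1 : Nat) : Int) = (n : Int) + 1 := by push_cast; ring
    rw [hc, PySem.List.pyRange_one_succ_right (by positivity), List.foldl_append]
    have hm : m + (n + 1) = (m + 1) + n := by omega
    rw [hm, ih (m + 1) base]
    have hlen : n + 1 ≤ (List.replicate (m + 1) base ++ List.replicate n (base + 1)).length := by
      simp only [List.length_append, List.length_replicate]; omega
    have hpos : (List.replicate (m + 1) base ++ List.replicate n (base + 1)).length - (n + 1) = m := by
      simp only [List.length_append, List.length_replicate]; omega
    simp only [List.foldl_cons, List.foldl_nil]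
    rw [pyGetD_negSucc _ n _ hlen, pySetD_negSucc _ n _ hlen, hpos]
    have hget : (List.replicate (m + 1) base ++ List.replicate n (base + 1)).getD m 0 = base := by
      rw [List.getD_eq_getElem _ _ (by simp only [List.length_append, List.length_replicate]; omega)]
      rw [List.getElem_append_left (by simp)]
      simp
    rw [hget]
    rw [List.set_append]
    simp only [List.length_replicate, if_pos (by omega : m < m + 1)]
    have hsetl : (List.replicate (m + 1) base).set m (base + 1)
        = List.replicate m base ++ [base + 1] := by
      have : List.replicate (m + 1) base = List.replicate m base ++ [base] := by
        simp [List.replicate_succ']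
      rw [this, List.set_append]
      simp
    rw [hsetl, List.append_assoc]
    congr 1

-- ===== VERDICT (by name: the statement is the Claim_ definition above) =====
theorem interleave_offsets_spec : Claim_equal_interleave_offsets := by
  intro batch nu _ hpre
  have hpre' : 0 ≤ nu := hpre
  unfold Spec_interleave_offsets
  simp only [interleave_offsets, interleave_offsets_alt]
  have hk : (0 : Int) < nu + 1 := by omega
  set k : Int := nu + 1 with hkdef
  set base : Int := PySem.Int.floordiv batch k with hbase
  set r : Int := PySem.Int.mod batch k with hrdef
  have hr0 : 0 ≤ r := by
    rw [hrdef, PySem.Int.mod_eq_emod_of_pos hk]; exact Int.emod_nonneg batch (by omega)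
  have hrk : r < k := by
    rw [hrdef, PySem.Int.mod_eq_emod_of_pos hk]; exact Int.emod_lt_of_pos batch hk
  obtain ⟨r', hr'⟩ : ∃ r' : Nat, (r' : Int) = r := ⟨r.toNat, by omega⟩
  obtain ⟨m, hm⟩ : ∃ m : Nat, (m : Int) = k - r := ⟨(k - r).toNat, by omega⟩
  have hkt : k.toNat = m + r' := by omega
  -- A side
  rw [PySem.List.pyRepeat_singleton, hkt]
  have hsum : (List.replicate (m + r') base).sum = ((m + r' : Nat) : Int) * base := by
    simp [List.sum_replicate]
  rw [hsum]
  have hbr : batch - ((m + r' : Nat) : Int) * base = (r' : Int) := by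
    have hfm := PySem.Int.floordiv_mul_add_mod batch k
    have hc : ((m + r' : Nat) : Int) = k := by omega
    rw [hc]
    rw [← hbase, ← hrdef] at hfm
    have : base * k = k * base := mul_comm _ _
    omega
  rw [hbr, loop_repl r' m base]
  have hfold := foldl_offsets (List.replicate m base ++ List.replicate r' (base + 1)) [] 0
  simp only [List.nil_append] at hfold
  rw [hfold]
  rw [psum_append, psum_replicate, psum_replicate]
  -- B side
  rw [PySem.List.pyRange_one]
  have hk1 : (k + 1 - 0).toNat = m + r' + 1 := by omega
  rw [hk1, List.range_succ_eq_map, List.range_add]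
  simp only [List.map_cons, List.map_map, List.map_append]
  have hsum2 : (List.replicate m base).sum = (m : Int) * base := by
    simp [List.sum_replicate]
  rw [hsum2]
  congr 1
  · simp [← hm]
  congr 1
  · apply List.map_congr_left
    intro a ha
    have halt : a < m := List.mem_range.mp ha
    simp [Function.comp, Nat.succ_eq_add_one]
    omega
  · apply List.map_congr_left
    intro a _
    simp [Function.comp, Nat.succ_eq_add_one]
    have hmax : max 0 (((m + a + 1 : Nat) : Int) - (k - r)) = (a : Int) + 1 := by
      rw [← hm]; push_cast; omega
    push_cast at hmax ⊢
    rw [hmax]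
    ring
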